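-- pv_equiv track=rewrite | github.com/auroraingebrigtsen/bayesian-structure-learning | partial_order_approach.py | get_ideals
-- ===== SOURCE A (Python) =====
-- from typing import List, Dict, Tuple, FrozenSet, Iterable, Set
--
-- def get_ideals(M: Set[str], pred: Dict[str, Set[str]]) -> List[FrozenSet[str]]:
--     ideals: Set[FrozenSet[str]] = set()
--     stack = [(frozenset(), frozenset(M))]  # (included, remaining)
--
--     while stack:
--         included, remaining = stack.pop()
--         ideals.add(included)
--
--         available = {x for x in remaining if pred[x] <= included}
--         if not available:
--             continue
--
--         x = next(iter(available))
--         stack.append((included | {x}, remaining - {x}))  # including x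
--         stack.append((included, remaining - {x}))  # excluding x
--
--     return sorted(ideals, key=lambda s: (len(s), sorted(s)))
-- ===== SOURCE B (Python) =====
-- def get_ideals(M, pred):
--     elems = set(M)
--     cur = {frozenset()}
--     ideals = {frozenset()}
--     for _ in range(len(elems)):
--         cur = {I | {x} for I in cur for x in elems
--                if x not in I and set(pred[x]) <= I}
--         ideals |= cur
--     return sorted(ideals, key=lambda s: (len(s), sorted(s)))
-- ===== Notes on version B (the rewrite author's own statement) =====
-- stated objective: alternative
-- what changed: Replaces A's include/exclude DFS over a pivot element (explicit stack of (included, remaining) pairs) with a level-by-level BFS over the ideal lattice: starting from the empty ideal, each round builds every ideal of size k+1 by adding one addable element to an ideal of size k, for len(set(M)) rounds.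
import Mathlib
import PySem

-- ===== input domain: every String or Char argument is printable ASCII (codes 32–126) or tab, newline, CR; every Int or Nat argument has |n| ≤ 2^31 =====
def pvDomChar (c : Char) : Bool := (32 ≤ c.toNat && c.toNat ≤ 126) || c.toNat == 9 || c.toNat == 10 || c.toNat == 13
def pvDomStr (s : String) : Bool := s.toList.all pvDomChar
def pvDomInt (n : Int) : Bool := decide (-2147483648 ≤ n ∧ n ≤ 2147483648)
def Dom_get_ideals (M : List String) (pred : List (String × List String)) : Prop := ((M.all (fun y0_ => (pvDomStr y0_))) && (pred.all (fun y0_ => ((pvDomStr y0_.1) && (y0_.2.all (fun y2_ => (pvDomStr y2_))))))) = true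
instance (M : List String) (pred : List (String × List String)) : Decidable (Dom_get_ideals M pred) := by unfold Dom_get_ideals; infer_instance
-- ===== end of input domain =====

-- B enumerates the ideal lattice level by level (all ideals of size k+1 extend ideals of size k)
-- instead of A's include/exclude DFS on a pivot element; equivalence is about the return value only.

-- shared primitives: Python's pred[x] (dict lookup, first match; missing keys are outside Pre_),
-- frozensets modelled as canonically sorted duplicate-free lists, and the test pred[x] <= I.
def pvPred (pred : List (String × List String)) (x : String) : List String :=
  (((pred.find? (fun p => p.1 == x)).map (fun p => p.2)).getD [])

def pvIns (x : String) (I : List String) : List String := List.orderedInsert (· ≤ ·) x I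

def pvSub (pred : List (String × List String)) (x : String) (I : List String) : Bool :=
  PySem.Set.issubset (PySem.Set.ofList (pvPred pred x)) I

-- ===== PORT A =====
def pvALoop (pred : List (String × List String)) :
    List (List String × List String) → PySem.Set (List String) → PySem.Set (List String)
  | [], ideals => ideals
  | (included, remaining) :: stack, ideals =>
    let ideals' := PySem.Set.add ideals included
    match h : remaining.filter (fun x => pvSub pred x included) with
    | [] => pvALoop pred stack ideals'
    | x :: _ =>
      pvALoop pred ((included, remaining.erase x) ::
        (pvIns x included, remaining.erase x) :: stack) ideals'
  termination_by stack _ => (stack.map (fun p => 3 ^ p.2.length)).sum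
  decreasing_by
  · simp only [List.map_cons, List.sum_cons]
    have h3 : 0 < 3 ^ remaining.length := Nat.pow_pos (by norm_num)
    omega
  · have hx : x ∈ remaining := by
      have : x ∈ remaining.filter (fun x => pvSub pred x included) := by
        rw [h]; exact List.mem_cons_self
      exact List.mem_of_mem_filter this
    have hlen : (remaining.erase x).length = remaining.length - 1 :=
      List.length_erase_of_mem hx
    have hpos : 0 < remaining.length := List.length_pos_of_mem hx
    simp only [List.map_cons, List.sum_cons, hlen]
    have : 3 ^ remaining.length = 3 ^ (remaining.length - 1) * 3 := by
      conv_lhs => rw [show remaining.length = (remaining.length - 1) + 1 by omega]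
      rw [pow_succ]
    have h1 : 0 < 3 ^ (remaining.length - 1) := Nat.pow_pos (by norm_num)
    omega

def get_ideals (M : List String) (pred : List (String × List String)) : List (List String) :=
  PySem.List.sorted2 (pvALoop pred [([], PySem.Set.ofList M)] PySem.Set.empty)
    (fun s => s.length) (fun s => s) false

-- ===== PORT B =====
def pvBStep (pred : List (String × List String)) (elems : List String)
    (cur : List (List String)) : PySem.Set (List String) :=
  cur.foldl (fun acc I =>
    elems.foldl (fun acc2 x =>
      if !I.contains x && pvSub pred x I then PySem.Set.add acc2 (pvIns x I) else acc2) acc)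
    PySem.Set.empty

def pvBState (pred : List (String × List String)) (elems : List String) (n : Nat) :
    List (List String) × PySem.Set (List String) :=
  (List.range n).foldl
    (fun st _ =>
      let nxt := pvBStep pred elems st.1
      (nxt, PySem.Set.union st.2 nxt))
    ([([] : List String)], PySem.Set.add PySem.Set.empty [])

def get_ideals_alt (M : List String) (pred : List (String × List String)) : List (List String) :=
  let elems := PySem.Set.ofList M
  PySem.List.sorted2 (pvBState pred elems (PySem.Set.ofList M).length).2
    (fun s => s.length) (fun s => s) false

-- ===== PRECONDITION & SPEC =====
-- Pre_ excludes exactly the inputs where Python A raises KeyError: some element of M is not a key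
-- of pred. (Both ports model the lookup totally with a default, so the equality proof itself does
-- not need Pre_; Pre_ only marks where the Pythons return at all.)
def Pre_get_ideals (M : List String) (pred : List (String × List String)) : Prop :=
  ∀ x ∈ M, ∃ p ∈ pred, p.1 = x
instance (M : List String) (pred : List (String × List String)) : Decidable (Pre_get_ideals M pred) := by unfold Pre_get_ideals; infer_instance

def pvWitness_get_ideals : List String × (List (String × List String)) :=
  (["a", "b"], [("a", []), ("b", ["a"])])

def Spec_get_ideals (M : List String) (pred : List (String × List String)) (out : List (List String)) : Prop := out = get_ideals_alt M pred
instance (M : List String) (pred : List (String × List String)) (out : List (List String)) : Decidable (Spec_get_ideals M pred out) := by unfold Spec_get_ideals; infer_instance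

-- ===== CLAIM (what is proved, stated in full; the proofs are below) =====
def Claim_equal_get_ideals : Prop := ∀ (M : List String) (pred : List (String × List String)), Dom_get_ideals M pred → Pre_get_ideals M pred → Spec_get_ideals M pred (get_ideals M pred)

-- ===== LEMMAS AND PROOFS =====

-- J is reachable from `inc` in n single-element extensions, each adding an x ∈ S
-- whose predecessors are already included.
inductive pvSteps (pred : List (String × List String)) (S : List String) :
    Nat → List String → List String → Prop
  | refl (inc : List String) : pvSteps pred S 0 inc inc
  | step {n : Nat} {inc J : List String} {x : String} :
      x ∈ S → x ∉ inc → pvSub pred x inc = true →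
      pvSteps pred S n (pvIns x inc) J → pvSteps pred S (n + 1) inc J

def pvFrom (pred : List (String × List String)) (S inc J : List String) : Prop :=
  ∃ n, pvSteps pred S n inc J

theorem mem_pvIns {a x : String} {I : List String} : a ∈ pvIns x I ↔ a = x ∨ a ∈ I :=
  List.mem_orderedInsert _

theorem sorted_pvIns {x : String} {I : List String} (h : I.Sorted (· ≤ ·)) :
    (pvIns x I).Sorted (· ≤ ·) := List.Pairwise.orderedInsert x I h

theorem nodup_pvIns {x : String} {I : List String} (hx : x ∉ I) (h : I.Nodup) :
    (pvIns x I).Nodup :=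
  (List.perm_orderedInsert _ x I).nodup_iff.mpr (List.nodup_cons.mpr ⟨hx, h⟩)

theorem length_pvIns (x : String) (I : List String) : (pvIns x I).length = I.length + 1 :=
  List.orderedInsert_length _ _ _

theorem pvIns_comm {x y : String} {I : List String} (h : I.Sorted (· ≤ ·)) :
    pvIns x (pvIns y I) = pvIns y (pvIns x I) := by
  refine List.Perm.eq_of_pairwise (fun a b _ _ hab hba => le_antisymm hab hba)
    (sorted_pvIns (sorted_pvIns h)) (sorted_pvIns (sorted_pvIns h))
    ((List.perm_orderedInsert _ x _).trans (((List.perm_orderedInsert _ y I).cons x).trans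
      ((List.Perm.swap y x I).trans (((List.perm_orderedInsert _ x I).symm.cons y).trans
        (List.perm_orderedInsert _ y _).symm))))

theorem pvSub_mono {pred x} {I I2 : List String} (h : pvSub pred x I = true)
    (hsub : ∀ a ∈ I, a ∈ I2) : pvSub pred x I2 = true := by
  rw [pvSub, PySem.Set.issubset_iff] at *
  exact fun a ha => hsub a (h a ha)

theorem pvSteps_subset {pred S n inc J} (h : pvSteps pred S n inc J) : inc ⊆ J := by
  induction h with
  | refl => exact fun a ha => ha
  | step _ _ _ _ ih => exact fun a ha => ih (mem_pvIns.mpr (Or.inr ha))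

theorem pvSteps_length {pred S n inc J} (h : pvSteps pred S n inc J) :
    J.length = inc.length + n := by
  induction h with
  | refl => simp
  | step _ _ _ _ ih => rw [ih, length_pvIns]; omega

theorem pvSteps_mem {pred S n inc J} (h : pvSteps pred S n inc J) :
    ∀ a ∈ J, a ∈ inc ∨ a ∈ S := by
  induction h with
  | refl => exact fun a ha => Or.inl ha
  | step hxS _ _ _ ih =>
    intro a ha
    rcases ih a ha with hin | hin
    · rcases mem_pvIns.mp hin with rfl | hin2
      · exact Or.inr hxS
      · exact Or.inl hin2
    · exact Or.inr hin

theorem pvSteps_nodup {pred S n inc J} (h : pvSteps pred S n inc J) (hn : inc.Nodup) :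
    J.Nodup := by
  induction h with
  | refl => exact hn
  | step _ hxi _ _ ih => exact ih (nodup_pvIns hxi hn)

theorem pvSteps_erase_of_not_mem {pred S n inc J x} (h : pvSteps pred S n inc J)
    (hx : x ∉ J) : pvSteps pred (S.erase x) n inc J := by
  induction h with
  | refl => exact pvSteps.refl _
  | @step n inc J y hyS hyi hsub hrest ih =>
    have hyJ : y ∈ J := pvSteps_subset hrest (mem_pvIns.mpr (Or.inl rfl))
    have hne : y ≠ x := fun e => hx (e ▸ hyJ)
    exact pvSteps.step ((List.mem_erase_of_ne hne).mpr hyS) hyi hsub (ih hx)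

theorem pvSteps_erase_of_mem_inc {pred S n inc J x} (hx : x ∈ inc)
    (h : pvSteps pred S n inc J) : pvSteps pred (S.erase x) n inc J := by
  induction h with
  | refl => exact pvSteps.refl _
  | @step n inc J y hyS hyi hsub hrest ih =>
    have hne : y ≠ x := fun e => hyi (e ▸ hx)
    exact pvSteps.step ((List.mem_erase_of_ne hne).mpr hyS) hyi hsub
      (ih (mem_pvIns.mpr (Or.inr hx)))

theorem pvSteps_exchange {pred S n inc J x} (hs : inc.Sorted (· ≤ ·))
    (h : pvSteps pred S n inc J) (hxS : x ∈ S) (hxi : x ∉ inc)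
    (hsub : pvSub pred x inc = true) (hxJ : x ∈ J) :
    ∃ m, pvSteps pred (S.erase x) m (pvIns x inc) J := by
  induction h with
  | refl => exact absurd hxJ hxi
  | @step n inc J y hyS hyi hysub hrest ih =>
    by_cases hxy : y = x
    · subst hxy
      exact ⟨n, pvSteps_erase_of_mem_inc (mem_pvIns.mpr (Or.inl rfl)) hrest⟩
    · have hxIns : x ∉ pvIns y inc := fun hm => by
        rcases mem_pvIns.mp hm with rfl | hm2
        · exact hxy rfl
        · exact hxi hm2
      have hsub2 : pvSub pred x (pvIns y inc) = true :=
        pvSub_mono hsub (fun a ha => mem_pvIns.mpr (Or.inr ha))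
      obtain ⟨m, hm⟩ := ih (sorted_pvIns hs) hxIns hsub2 hxJ
      rw [pvIns_comm hs] at hm
      refine ⟨m + 1, pvSteps.step ((List.mem_erase_of_ne hxy).mpr hyS)
        ?_ ?_ hm⟩
      · intro hm2
        rcases mem_pvIns.mp hm2 with rfl | hm3
        · exact hxy rfl
        · exact hyi hm3
      · exact pvSub_mono hysub (fun a ha => mem_pvIns.mpr (Or.inr ha))

theorem pvSteps_snoc {pred S n inc I x} (h : pvSteps pred S n inc I) (hxS : x ∈ S)
    (hxI : x ∉ I) (hsub : pvSub pred x I = true) : pvSteps pred S (n + 1) inc (pvIns x I) := by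
  induction h with
  | refl => exact pvSteps.step hxS hxI hsub (pvSteps.refl _)
  | step hyS hyi hysub _ ih => exact pvSteps.step hyS hyi hysub (ih hxI hsub)

theorem pvSteps_zero {pred S inc J} (h : pvSteps pred S 0 inc J) : J = inc := by
  cases h; rfl

theorem pvSteps_succ {pred S n inc J} (h : pvSteps pred S (n + 1) inc J) :
    ∃ I x, pvSteps pred S n inc I ∧ x ∈ S ∧ x ∉ I ∧ pvSub pred x I = true ∧ J = pvIns x I := by
  induction n generalizing inc with
  | zero =>
    rcases h with _ | ⟨hxS, hxi, hsub, hrest⟩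
    exact ⟨inc, _, pvSteps.refl _, hxS, hxi, hsub, by rw [pvSteps_zero hrest]⟩
  | succ n ih =>
    rcases h with _ | ⟨hyS, hyi, hysub, hrest⟩
    obtain ⟨I, x, hI, hxS, hxI, hsub, rfl⟩ := ih hrest
    exact ⟨I, x, pvSteps.step hyS hyi hysub hI, hxS, hxI, hsub, rfl⟩

theorem pvALoop_nil {pred : List (String × List String)} {ideals : PySem.Set (List String)} :
    pvALoop pred [] ideals = ideals := by rw [pvALoop]

theorem pvALoop_cons_nil {pred : List (String × List String)} {included remaining : List String}
    {stack : List (List String × List String)} {ideals : PySem.Set (List String)}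
    (h : remaining.filter (fun x => pvSub pred x included) = []) :
    pvALoop pred ((included, remaining) :: stack) ideals =
      pvALoop pred stack (PySem.Set.add ideals included) := by
  conv_lhs => rw [pvALoop, h]

theorem pvALoop_cons_cons {pred : List (String × List String)} {included remaining : List String}
    {stack : List (List String × List String)} {ideals : PySem.Set (List String)}
    {x : String} {tail : List String}
    (h : remaining.filter (fun x => pvSub pred x included) = x :: tail) :
    pvALoop pred ((included, remaining) :: stack) ideals =
      pvALoop pred ((included, remaining.erase x) ::
        (pvIns x included, remaining.erase x) :: stack) (PySem.Set.add ideals included) := by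
  conv_lhs => rw [pvALoop, h]

-- ===== A side =====
theorem pvALoop_sound (pred : List (String × List String)) (elems : List String) :
    ∀ stack ideals, (∀ J ∈ ideals, pvFrom pred elems [] J) →
    (∀ e ∈ stack, pvFrom pred elems [] e.1 ∧ (∀ a ∈ e.2, a ∈ elems) ∧ e.2.Nodup ∧
      (∀ a ∈ e.2, a ∉ e.1)) →
    ∀ J ∈ pvALoop pred stack ideals, pvFrom pred elems [] J := by
  intro stack ideals
  induction stack, ideals using pvALoop.induct pred with
  | case1 ideals =>
    intro hid _ J hJ
    rw [pvALoop_nil] at hJ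
    exact hid J hJ
  | case2 included remaining stack ideals ideals2 hf ih =>
    intro hid hstack J hJ
    rw [pvALoop_cons_nil hf] at hJ
    refine ih ?_ (fun e he => hstack e (List.mem_cons_of_mem _ he)) J hJ
    intro K hK
    rcases (PySem.Set.mem_add _ _ _).mp hK with hK | rfl
    · exact hid K hK
    · exact (hstack _ List.mem_cons_self).1
  | case3 included remaining stack ideals ideals2 x tail hf ih =>
    intro hid hstack J hJ
    rw [pvALoop_cons_cons hf] at hJ
    obtain ⟨hFrom, hsubE, hnd, hdisj⟩ := hstack _ List.mem_cons_self
    have hxf : x ∈ remaining.filter (fun x => pvSub pred x included) := by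
      rw [hf]; exact List.mem_cons_self
    have hxrem : x ∈ remaining := List.mem_of_mem_filter hxf
    have hxsub : pvSub pred x included = true := (List.mem_filter.mp hxf).2
    refine ih ?_ ?_ J hJ
    · intro K hK
      rcases (PySem.Set.mem_add _ _ _).mp hK with hK | rfl
      · exact hid K hK
      · exact hFrom
    · intro e he
      rcases List.mem_cons.mp he with rfl | he
      · 
        exact ⟨hFrom, fun a ha => hsubE a (List.mem_of_mem_erase ha),
          hnd.erase x, fun a ha => hdisj a (List.mem_of_mem_erase ha)⟩
      rcases List.mem_cons.mp he with rfl | he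
      · 
        refine ⟨?_, fun a ha => hsubE a (List.mem_of_mem_erase ha), hnd.erase x, ?_⟩
        · obtain ⟨n, hsteps⟩ := hFrom
          exact ⟨n + 1, pvSteps_snoc hsteps (hsubE x hxrem) (hdisj x hxrem) hxsub⟩
        · intro a ha hmem
          obtain ⟨hne, harem⟩ := (List.Nodup.mem_erase_iff hnd).mp ha
          rcases mem_pvIns.mp hmem with rfl | hmem2
          · exact hne rfl
          · exact hdisj a harem hmem2
      · exact hstack e (List.mem_cons_of_mem _ he)

theorem pvALoop_complete (pred : List (String × List String)) :
    ∀ stack ideals,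
    (∀ e ∈ stack, e.1.Sorted (· ≤ ·) ∧ e.2.Nodup ∧ (∀ a ∈ e.2, a ∉ e.1)) →
    ∀ J, (J ∈ ideals ∨ ∃ e ∈ stack, pvFrom pred e.2 e.1 J) → J ∈ pvALoop pred stack ideals := by
  intro stack ideals
  induction stack, ideals using pvALoop.induct pred with
  | case1 ideals =>
    intro _ J hJ
    rw [pvALoop_nil]
    rcases hJ with hJ | ⟨e, he, _⟩
    · exact hJ
    · exact absurd he (List.not_mem_nil)
  | case2 included remaining stack ideals ideals2 hf ih =>
    intro hstack J hJ
    rw [pvALoop_cons_nil hf]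
    refine ih (fun e he => hstack e (List.mem_cons_of_mem _ he)) J ?_
    rcases hJ with hJ | ⟨e, he, hFrom⟩
    · exact Or.inl ((PySem.Set.mem_add _ _ _).mpr (Or.inl hJ))
    rcases List.mem_cons.mp he with rfl | he
    · 
      obtain ⟨n, hsteps⟩ := hFrom
      cases hsteps with
      | refl => exact Or.inl ((PySem.Set.mem_add _ _ _).mpr (Or.inr rfl))
      | step hyS hyi hysub _ =>
        exfalso
        have : _ ∈ remaining.filter (fun x => pvSub pred x included) :=
          List.mem_filter.mpr ⟨hyS, hysub⟩
        rw [hf] at this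
        exact absurd this (List.not_mem_nil)
    · exact Or.inr ⟨e, he, hFrom⟩
  | case3 included remaining stack ideals ideals2 x tail hf ih =>
    intro hstack J hJ
    rw [pvALoop_cons_cons hf]
    obtain ⟨hsort, hnd, hdisj⟩ := hstack _ List.mem_cons_self
    have hxf : x ∈ remaining.filter (fun x => pvSub pred x included) := by
      rw [hf]; exact List.mem_cons_self
    have hxrem : x ∈ remaining := List.mem_of_mem_filter hxf
    have hxsub : pvSub pred x included = true := (List.mem_filter.mp hxf).2
    have hinv : ∀ e ∈ (included, remaining.erase x) ::
        (pvIns x included, remaining.erase x) :: stack,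
        e.1.Sorted (· ≤ ·) ∧ e.2.Nodup ∧ (∀ a ∈ e.2, a ∉ e.1) := by
      intro e he
      rcases List.mem_cons.mp he with rfl | he
      · 
        exact ⟨hsort, hnd.erase x, fun a ha => hdisj a (List.mem_of_mem_erase ha)⟩
      rcases List.mem_cons.mp he with rfl | he
      · 
        refine ⟨sorted_pvIns hsort, hnd.erase x, ?_⟩
        intro a ha hmem
        obtain ⟨hne, harem⟩ := (List.Nodup.mem_erase_iff hnd).mp ha
        rcases mem_pvIns.mp hmem with rfl | hmem2
        · exact hne rfl
        · exact hdisj a harem hmem2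
      · exact hstack e (List.mem_cons_of_mem _ he)
    refine ih hinv J ?_
    rcases hJ with hJ | ⟨e, he, hFrom⟩
    · exact Or.inl ((PySem.Set.mem_add _ _ _).mpr (Or.inl hJ))
    rcases List.mem_cons.mp he with rfl | he
    · 
      obtain ⟨n, hsteps⟩ := hFrom
      by_cases hxJ : x ∈ J
      · obtain ⟨m, hm⟩ := pvSteps_exchange hsort hsteps hxrem (hdisj x hxrem) hxsub hxJ
        exact Or.inr ⟨(pvIns x included, remaining.erase x),
          List.mem_cons_of_mem _ List.mem_cons_self, m, hm⟩
      · exact Or.inr ⟨(included, remaining.erase x), List.mem_cons_self, n,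
          pvSteps_erase_of_not_mem hsteps hxJ⟩
    · exact Or.inr ⟨e, List.mem_cons_of_mem _ (List.mem_cons_of_mem _ he), hFrom⟩

theorem pvALoop_nodup (pred : List (String × List String)) :
    ∀ stack ideals, List.Nodup ideals → List.Nodup (pvALoop pred stack ideals) := by
  intro stack ideals
  induction stack, ideals using pvALoop.induct pred with
  | case1 ideals => intro h; rw [pvALoop_nil]; exact h
  | case2 included remaining stack ideals ideals2 hf ih =>
    intro h
    rw [pvALoop_cons_nil hf]
    exact ih (PySem.Set.nodup_add _ _ h)
  | case3 included remaining stack ideals ideals2 x tail hf ih =>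
    intro h
    rw [pvALoop_cons_cons hf]
    exact ih (PySem.Set.nodup_add _ _ h)

-- ===== B side =====
theorem mem_pvBInner {pred : List (String × List String)} {elems : List String}
    {I : List String} {acc : PySem.Set (List String)} {J : List String} :
    J ∈ elems.foldl (fun acc2 x =>
        if !I.contains x && pvSub pred x I then PySem.Set.add acc2 (pvIns x I) else acc2) acc ↔
      J ∈ acc ∨ ∃ x ∈ elems, x ∉ I ∧ pvSub pred x I = true ∧ J = pvIns x I := by
  induction elems generalizing acc with
  | nil => simp
  | cons y ys ih =>
    simp only [List.foldl_cons]
    by_cases h1 : y ∈ I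
    · have hc : (!I.contains y && pvSub pred y I) = false := by simp [h1]
      rw [hc]
      simp only [Bool.false_eq_true, if_false, ih, List.mem_cons]
      constructor
      · rintro (h | ⟨x, hx, hrest⟩)
        · exact Or.inl h
        · exact Or.inr ⟨x, Or.inr hx, hrest⟩
      · rintro (h | ⟨x, (rfl | hx), hxI, hrest⟩)
        · exact Or.inl h
        · exact absurd h1 hxI
        · exact Or.inr ⟨x, hx, hxI, hrest⟩
    · by_cases h2 : pvSub pred y I = true
      · have hc : (!I.contains y && pvSub pred y I) = true := by simp [h1, h2]
        rw [hc]
        simp only [if_true, ih, PySem.Set.mem_add, List.mem_cons]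
        constructor
        · rintro ((h | rfl) | ⟨x, hx, hrest⟩)
          · exact Or.inl h
          · exact Or.inr ⟨y, Or.inl rfl, h1, h2, rfl⟩
          · exact Or.inr ⟨x, Or.inr hx, hrest⟩
        · rintro (h | ⟨x, (rfl | hx), hxI, hsub, rfl⟩)
          · exact Or.inl (Or.inl h)
          · exact Or.inl (Or.inr rfl)
          · exact Or.inr ⟨x, hx, hxI, hsub, rfl⟩
      · have hc : (!I.contains y && pvSub pred y I) = false := by
          simp only [Bool.and_eq_false_iff]
          exact Or.inr (Bool.not_eq_true _ ▸ h2)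
        rw [hc]
        simp only [Bool.false_eq_true, if_false, ih, List.mem_cons]
        constructor
        · rintro (h | ⟨x, hx, hrest⟩)
          · exact Or.inl h
          · exact Or.inr ⟨x, Or.inr hx, hrest⟩
        · rintro (h | ⟨x, (rfl | hx), hxI, hsub, hrest⟩)
          · exact Or.inl h
          · exact absurd hsub h2
          · exact Or.inr ⟨x, hx, hxI, hsub, hrest⟩

theorem mem_pvBStep_aux {pred : List (String × List String)} {elems : List String}
    {cur : List (List String)} {acc : PySem.Set (List String)} {J : List String} :
    J ∈ cur.foldl (fun acc I =>
        elems.foldl (fun acc2 x =>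
          if !I.contains x && pvSub pred x I then PySem.Set.add acc2 (pvIns x I) else acc2) acc)
      acc ↔
      J ∈ acc ∨ ∃ I ∈ cur, ∃ x ∈ elems, x ∉ I ∧ pvSub pred x I = true ∧ J = pvIns x I := by
  induction cur generalizing acc with
  | nil => simp
  | cons I0 Is ih =>
    simp only [List.foldl_cons, ih, mem_pvBInner, List.mem_cons]
    constructor
    · rintro ((h | ⟨x, hx⟩) | ⟨I, hI, hrest⟩)
      · exact Or.inl h
      · exact Or.inr ⟨I0, Or.inl rfl, x, hx⟩
      · exact Or.inr ⟨I, Or.inr hI, hrest⟩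
    · rintro (h | ⟨I, (rfl | hI), hrest⟩)
      · exact Or.inl (Or.inl h)
      · exact Or.inl (Or.inr hrest)
      · exact Or.inr ⟨I, hI, hrest⟩

theorem mem_pvBStep {pred : List (String × List String)} {elems : List String}
    {cur : List (List String)} {J : List String} :
    J ∈ pvBStep pred elems cur ↔
      ∃ I ∈ cur, ∃ x ∈ elems, x ∉ I ∧ pvSub pred x I = true ∧ J = pvIns x I := by
  rw [pvBStep, mem_pvBStep_aux]
  simp [PySem.Set.empty]

theorem pvBState_succ (pred : List (String × List String)) (elems : List String) (n : Nat) :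
    pvBState pred elems (n + 1) =
      ((pvBStep pred elems (pvBState pred elems n).1),
        PySem.Set.union (pvBState pred elems n).2 (pvBStep pred elems (pvBState pred elems n).1)) := by
  simp [pvBState, List.range_succ]

theorem pvBState_inv (pred : List (String × List String)) (elems : List String) (n : Nat) :
    (∀ J, J ∈ (pvBState pred elems n).1 ↔ pvSteps pred elems n [] J) ∧
    (∀ J, J ∈ (pvBState pred elems n).2 ↔ ∃ m ≤ n, pvSteps pred elems m [] J) ∧
    (pvBState pred elems n).2.Nodup := by
  induction n with
  | zero =>
    have h0 : pvBState pred elems 0 = ([([] : List String)], [([] : List String)]) := by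
      simp [pvBState, PySem.Set.add, PySem.Set.empty, PySem.Set.contains]
    rw [h0]
    refine ⟨?_, ?_, ?_⟩
    · intro J
      simp only [List.mem_singleton]
      exact ⟨fun h => h ▸ pvSteps.refl _, fun h => pvSteps_zero h⟩
    · intro J
      simp only [List.mem_singleton]
      constructor
      · exact fun h => ⟨0, le_refl 0, h ▸ pvSteps.refl _⟩
      · rintro ⟨m, hm, hsteps⟩
        have : m = 0 := Nat.le_zero.mp hm
        subst this
        exact pvSteps_zero hsteps
    · exact List.nodup_singleton _
  | succ n ih =>
    obtain ⟨ih1, ih2, ihnd⟩ := ih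
    rw [pvBState_succ]
    have hcur : ∀ J, J ∈ pvBStep pred elems (pvBState pred elems n).1 ↔
        pvSteps pred elems (n + 1) [] J := by
      intro J
      rw [mem_pvBStep]
      constructor
      · rintro ⟨I, hI, x, hxS, hxI, hsub, rfl⟩
        exact pvSteps_snoc ((ih1 I).mp hI) hxS hxI hsub
      · intro h
        obtain ⟨I, x, hI, hxS, hxI, hsub, rfl⟩ := pvSteps_succ h
        exact ⟨I, (ih1 I).mpr hI, x, hxS, hxI, hsub, rfl⟩
    refine ⟨hcur, ?_, PySem.Set.nodup_union _ _ ihnd⟩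
    intro J
    rw [PySem.Set.mem_union, ih2, hcur]
    constructor
    · rintro (⟨m, hm, hsteps⟩ | hsteps)
      · exact ⟨m, Nat.le_succ_of_le hm, hsteps⟩
      · exact ⟨n + 1, le_refl _, hsteps⟩
    · rintro ⟨m, hm, hsteps⟩
      rcases Nat.lt_or_ge m (n + 1) with hlt | hge
      · exact Or.inl ⟨m, Nat.lt_succ_iff.mp hlt, hsteps⟩
      · have : m = n + 1 := le_antisymm hm hge
        subst this
        exact Or.inr hsteps

theorem pvSteps_bound {pred elems m J} (h : pvSteps pred elems m [] J) :
    m ≤ elems.length := by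
  have hlen : J.length = m := by simpa using pvSteps_length h
  have hnd : J.Nodup := pvSteps_nodup h List.nodup_nil
  have hsub : ∀ a ∈ J, a ∈ elems := fun a ha =>
    (pvSteps_mem h a ha).resolve_left (List.not_mem_nil)
  have : J.length ≤ elems.length := by
    calc J.length = J.toFinset.card := (List.toFinset_card_of_nodup hnd).symm
      _ ≤ elems.toFinset.card := Finset.card_le_card (fun a ha => by
          simp only [List.mem_toFinset] at *
          exact hsub a ha)
      _ ≤ elems.length := elems.toFinset_card_le
  omega

-- ===== assembling =====
theorem pvBefore_eq : (fun (a b : List String) =>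
      decide (a.length < b.length) || (!decide (b.length < a.length) && decide (a < b)))
    = (fun a b => decide (toLex (a.length, a) < toLex (b.length, b))) := by
  funext a b
  have hlex : (toLex (a.length, a) < toLex (b.length, b)) ↔
      (a.length < b.length ∨ a.length = b.length ∧ a < b) := Prod.Lex.lt_iff
  by_cases h1 : a.length < b.length
  · simp [h1, hlex]
  · by_cases h2 : b.length < a.length
    · have h4 : ¬ a.length = b.length := by omega
      simp [h2, hlex, h4]
    · have h3 : a.length = b.length := by omega
      simp only [hlex]
      simp [h3]

theorem sorted2_eq_sorted_lex (xs : List (List String)) :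
    PySem.List.sorted2 xs (fun s => s.length) (fun s => s) false
      = PySem.List.sorted xs (fun s => toLex (s.length, s)) false := by
  rw [PySem.List.sorted2, PySem.List.sorted]
  simp only [if_neg (by decide : ¬ (false = true))]
  rw [pvBefore_eq]

theorem pvAB_members (pred : List (String × List String)) (elems : List String)
    (hnd : elems.Nodup) (J : List String) :
    J ∈ pvALoop pred [([], elems)] PySem.Set.empty ↔
      J ∈ (pvBState pred elems elems.length).2 := by
  obtain ⟨_, hB, _⟩ := pvBState_inv pred elems elems.length
  rw [hB]
  constructor
  · intro hJ
    have hFrom : pvFrom pred elems [] J := by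
      refine pvALoop_sound pred elems [([], elems)] PySem.Set.empty
        (fun K hK => absurd hK (List.not_mem_nil)) ?_ J hJ
      intro e he
      rcases List.mem_cons.mp he with rfl | he
      · exact ⟨⟨0, pvSteps.refl _⟩, fun a ha => ha, hnd, fun a _ ha => absurd ha (List.not_mem_nil)⟩
      · exact absurd he (List.not_mem_nil)
    obtain ⟨m, hsteps⟩ := hFrom
    exact ⟨m, pvSteps_bound hsteps, hsteps⟩
  · rintro ⟨m, _, hsteps⟩
    refine pvALoop_complete pred [([], elems)] PySem.Set.empty ?_ J
      (Or.inr ⟨([], elems), List.mem_cons_self, m, hsteps⟩)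
    intro e he
    rcases List.mem_cons.mp he with rfl | he
    · exact ⟨List.Pairwise.nil, hnd, fun a _ ha => absurd ha (List.not_mem_nil)⟩
    · exact absurd he (List.not_mem_nil)

-- ===== VERDICT (by name: the statement is the Claim_ definition above) =====
theorem get_ideals_spec : Claim_equal_get_ideals := by
  intro M pred _ _
  show get_ideals M pred = get_ideals_alt M pred
  rw [get_ideals, get_ideals_alt]
  rw [sorted2_eq_sorted_lex, sorted2_eq_sorted_lex]
  refine PySem.List.sorted_eq_sorted_of_perm _ _ _
    (fun a b h => congrArg (fun p => (ofLex p).2) h) ?_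
  refine (List.perm_ext_iff_of_nodup
    (pvALoop_nodup pred _ PySem.Set.empty List.nodup_nil)
    (pvBState_inv pred (PySem.Set.ofList M) (PySem.Set.ofList M).length).2.2).mpr ?_
  exact pvAB_members pred (PySem.Set.ofList M) (PySem.Set.nodup_ofList M)
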